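-- pv_equiv track=rewrite | github.com/wbsoft/livelex | parce/regex.py | common_suffix
-- ===== SOURCE A (Python) =====
-- def common_suffix(words):
--     """Return (words, suffix), where suffix is the common suffix.
--
--     If there is no common suffix, words is unchanged, and suffix is an
--     empty string. If there is a common suffix, that is chopped of the returned
--     words.
--
--     """
--     suffix = []
--     for s in map(set, zip(*map(reversed, words))):
--         if len(s) != 1:
--             break
--         suffix.append(s.pop())
--     suffix = ''.join(reversed(suffix))
--     if suffix:
--         i = -len(suffix)
--         words = [word[:i] for word in words]
--     return words, suffix
-- ===== SOURCE B (Python) =====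
-- def _lcp(a, b):
--     k = 0
--     m = min(len(a), len(b))
--     while k < m and a[k] == b[k]:
--         k += 1
--     return a[:k]
--
-- def common_suffix(words):
--     """Return (words, suffix), where suffix is the common suffix."""
--     if not words:
--         return words, ''
--     acc = words[0][::-1]
--     for w in words[1:]:
--         acc = _lcp(acc, w[::-1])
--         if not acc:
--             break
--     suffix = acc[::-1]
--     if suffix:
--         return [w[:-len(acc)] for w in words], suffix
--     return words, suffix
-- ===== Notes on version B (the rewrite author's own statement) =====
-- stated objective: alternative
-- what changed: A transposes the reversed words with zip and builds a one-element-check set per character position; B instead folds a pairwise longest-common-prefix over the reversed words (breaking early when it becomes empty), then strips — avoiding the per-position set construction.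
import Mathlib
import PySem

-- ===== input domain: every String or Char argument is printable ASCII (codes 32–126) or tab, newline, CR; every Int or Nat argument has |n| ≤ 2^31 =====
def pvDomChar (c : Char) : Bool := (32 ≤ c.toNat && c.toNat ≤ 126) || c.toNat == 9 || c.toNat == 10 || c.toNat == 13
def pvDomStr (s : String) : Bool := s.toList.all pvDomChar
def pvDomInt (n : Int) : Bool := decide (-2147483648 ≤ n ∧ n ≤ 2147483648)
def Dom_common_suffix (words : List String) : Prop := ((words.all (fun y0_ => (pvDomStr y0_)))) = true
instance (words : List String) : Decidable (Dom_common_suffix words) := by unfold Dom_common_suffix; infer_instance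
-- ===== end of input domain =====

-- B replaces A's transpose-and-set column scan by a pairwise fold: reverse the first
-- word and intersect (longest-common-prefix) with each further reversed word,
-- breaking early when empty — objective: alternative (same asymptotic cost).

-- ===== PORT A =====

-- termination helper for the zip transpose (cited by decreasing_by)
lemma pvSumLenTail_le (rss : List (List Char)) :
    ((rss.map List.tail).map List.length).sum ≤ (rss.map List.length).sum := by
  induction rss with
  | nil => simp
  | cons r rest ih =>
    simp only [List.map_cons, List.sum_cons]
    have : r.tail.length ≤ r.length := by
      cases r <;> simp
    omega

lemma pvSumLenTail_lt (rss : List (List Char)) (h1 : rss ≠ [])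
    (h2 : ¬ rss.any List.isEmpty) :
    ((rss.map List.tail).map List.length).sum < (rss.map List.length).sum := by
  cases rss with
  | nil => exact absurd rfl h1
  | cons r rest =>
    simp only [List.any_cons, Bool.or_eq_true, not_or] at h2
    have hr : r ≠ [] := by
      intro h; subst h; simp at h2
    have h3 := pvSumLenTail_le rest
    have h4 : r.tail.length < r.length := by
      cases r with
      | nil => exact absurd rfl hr
      | cons c cs => simp
    simp only [List.map_cons, List.sum_cons]
    omega

-- zip(*map(reversed, words)): columns of the reversed words, stopping at the shortest
def pyZipCols (rss : List (List Char)) : List (List Char) :=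
  if _h : rss = [] ∨ rss.any List.isEmpty then []
  else (rss.map (fun r => r.headD ' ')) :: pyZipCols (rss.map List.tail)
termination_by (rss.map List.length).sum
decreasing_by
  simpa using pvSumLenTail_lt rss (fun he => _h (Or.inl he)) (fun ha => _h (Or.inr ha))

-- the for-loop over map(set, …): break unless the column's set has one element, pop it
def colLoop : List (List Char) → List Char
  | [] => []
  | c :: cs =>
    let s := PySem.Set.ofList c
    if s.length = 1 then s.headD ' ' :: colLoop cs else []

def common_suffix (words : List String) : List String × String :=
  let revs := words.map (fun w => w.toList.reverse)
  let sufR := colLoop (pyZipCols revs)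
  let suffix := String.ofList sufR.reverse
  if sufR = [] then (words, suffix)
  else (words.map (fun w => String.ofList (w.toList.take (w.toList.length - sufR.length))), suffix)

-- ===== PORT B =====

-- _lcp: longest common prefix of two char lists (the index scan of Source B)
def lcpChars : List Char → List Char → List Char
  | a :: as_, b :: bs => if a = b then a :: lcpChars as_ bs else []
  | _, _ => []

-- the for-loop of Source B: fold _lcp over the remaining reversed words, break when empty
def accLoop (acc : List Char) : List String → List Char
  | [] => acc
  | w :: ws =>
    let a := lcpChars acc w.toList.reverse
    if a = [] then a else accLoop a ws

def common_suffix_alt (words : List String) : List String × String :=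
  match words with
  | [] => ([], "")
  | w0 :: rest =>
    let acc := accLoop w0.toList.reverse rest
    let suffix := String.ofList acc.reverse
    if acc = [] then (w0 :: rest, suffix)
    else ((w0 :: rest).map (fun w => String.ofList (w.toList.take (w.toList.length - acc.length))), suffix)

-- ===== PRECONDITION & SPEC =====
def Spec_common_suffix (words : List String) (out : List String × String) : Prop := out = common_suffix_alt words
instance (words : List String) (out : List String × String) : Decidable (Spec_common_suffix words out) := by unfold Spec_common_suffix; infer_instance

-- ===== CLAIM (what is proved, stated in full; the proofs are below) =====
def Claim_equal_common_suffix : Prop := ∀ (words : List String), Dom_common_suffix words → Spec_common_suffix words (common_suffix words)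

-- ===== LEMMAS AND PROOFS =====

-- canonical form both loops compute: longest prefix of r0 shared by every list of rest
def canon : List Char → List (List Char) → List Char
  | [], _ => []
  | c :: cs, rest =>
    if rest.all (fun r => r.head? = some c) then c :: canon cs (rest.map List.tail) else []

lemma canon_nil_rest (r0 : List Char) : canon r0 [] = r0 := by
  induction r0 with
  | nil => rfl
  | cons c cs ih => simp [canon, ih]

lemma lcpChars_nil_left (b : List Char) : lcpChars [] b = [] := by
  cases b <;> rfl

lemma canon_lcp (a b : List Char) (rs : List (List Char)) :
    canon (lcpChars a b) rs = canon a (b :: rs) := by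
  induction a generalizing b rs with
  | nil => simp [lcpChars_nil_left, canon]
  | cons c cs ih =>
    cases b with
    | nil => simp [lcpChars, canon]
    | cons d ds =>
      by_cases hcd : c = d
      · subst hcd
        rw [show lcpChars (c :: cs) (c :: ds) = c :: lcpChars cs ds from by
          simp [lcpChars]]
        by_cases hall : rs.all (fun r => r.head? = some c)
        · simp [canon, hall, ih ds (rs.map List.tail)]
        · simp [canon, hall]
      · simp [lcpChars, hcd, canon, Ne.symm hcd]

lemma accLoop_canon (acc : List Char) (ws : List String) :
    accLoop acc ws = canon acc (ws.map (fun w => w.toList.reverse)) := by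
  induction ws generalizing acc with
  | nil => simp [accLoop, canon_nil_rest]
  | cons w ws ih =>
    simp only [accLoop, List.map_cons]
    by_cases h : lcpChars acc w.toList.reverse = []
    · rw [if_pos h, ← canon_lcp, h]
      cases ws <;> simp [canon]
    · rw [if_neg h, ih, canon_lcp]

-- a set built from c :: l has one element iff every element of l is c, and then it is [c]
lemma set_ofList_singleton (c : Char) (l : List Char) :
    (PySem.Set.ofList (c :: l)).length = 1 ↔ l.all (fun x => x = c) := by
  constructor
  · intro h
    have hc : c ∈ PySem.Set.ofList (c :: l) := by
      rw [PySem.Set.mem_ofList]; exact List.mem_cons_self ..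
    match hs : PySem.Set.ofList (c :: l), h with
    | [x], _ =>
      rw [hs] at hc
      simp at hc
      subst hc
      rw [List.all_eq_true]
      intro y hy
      have : y ∈ PySem.Set.ofList (c :: l) := by
        rw [PySem.Set.mem_ofList]; exact List.mem_cons_of_mem _ hy
      rw [hs] at this; simpa using this
  · intro h
    have : PySem.Set.ofList (c :: l) = [c] := by
      have hnd := PySem.Set.nodup_ofList (c :: l)
      have hmem : ∀ x, x ∈ PySem.Set.ofList (c :: l) ↔ x = c := by
        intro x
        rw [PySem.Set.mem_ofList]
        constructor
        · intro hx
          rcases List.mem_cons.1 hx with h1 | h1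
          · exact h1
          · exact by simpa using (List.all_eq_true.1 h) x h1
        · intro hx; subst hx; exact List.mem_cons_self ..
      match hs : PySem.Set.ofList (c :: l) with
      | [] =>
        have := (hmem c).2 rfl
        rw [hs] at this; simp at this
      | [x] =>
        have := (hmem x).1 (by rw [hs]; simp)
        simp [this]
      | x :: y :: t =>
        have hx := (hmem x).1 (by rw [hs]; simp)
        have hy := (hmem y).1 (by rw [hs]; simp)
        rw [hs] at hnd
        simp [hx, hy] at hnd
    simp [this]

lemma set_ofList_head (c : Char) (l : List Char) (h : l.all (fun x => x = c)) :
    PySem.Set.ofList (c :: l) = [c] := by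
  have h1 := (set_ofList_singleton c l).2 h
  have hc : c ∈ PySem.Set.ofList (c :: l) := by
    rw [PySem.Set.mem_ofList]; exact List.mem_cons_self ..
  match hs : PySem.Set.ofList (c :: l), h1 with
  | [x], _ =>
    rw [hs] at hc; simp at hc; simp [hc]

lemma colLoop_canon (r0 : List Char) (rest : List (List Char)) :
    colLoop (pyZipCols (r0 :: rest)) = canon r0 rest := by
  induction r0 generalizing rest with
  | nil =>
    rw [pyZipCols.eq_def]
    simp [canon, colLoop]
  | cons c cs ih =>
    by_cases hE : rest.any List.isEmpty
    · rw [pyZipCols.eq_def, dif_pos (Or.inr (by simp [hE]))]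
      have : ¬ rest.all (fun r => r.head? = some c) := by
        simp only [List.any_eq_true] at hE
        obtain ⟨r, hr, hre⟩ := hE
        simp only [List.all_eq_true]
        intro hall
        have := hall r hr
        rw [List.isEmpty_iff.1 hre] at this
        simp at this
      simp [canon, this, colLoop]
    · rw [pyZipCols.eq_def, dif_neg]
      · simp only [List.map_cons, List.tail_cons]
        rw [colLoop]
        simp only [List.headD_cons]
        by_cases hall : rest.all (fun r => r.headD ' ' = c)
        · have hall' : (rest.map (fun r => r.headD ' ')).all (fun x => x = c) := by
            simp only [List.all_map]
            exact hall
          rw [set_ofList_head c _ hall']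
          simp only [List.length_cons, List.length_nil, List.headD_cons]
          rw [ih (rest.map List.tail)]
          have hall2 : rest.all (fun r => r.head? = some c) := by
            rw [List.all_eq_true] at hall ⊢
            intro r hr
            have h1 := hall r hr
            have h2 : ¬ r.isEmpty := by
              intro hre
              exact hE (List.any_eq_true.2 ⟨r, hr, hre⟩)
            cases r with
            | nil => simp at h2
            | cons x xs => simp_all
          simp [canon, hall2]
        · have hne : (PySem.Set.ofList (c :: rest.map (fun r => r.headD ' '))).length ≠ 1 := by
            intro h1
            have := (set_ofList_singleton c _).1 h1
            simp only [List.all_map] at this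
            exact hall this
          rw [if_neg hne]
          have hall2 : ¬ rest.all (fun r => r.head? = some c) := by
            intro h1
            apply hall
            rw [List.all_eq_true] at h1 ⊢
            intro r hr
            have := h1 r hr
            cases r with
            | nil => simp at this
            | cons x xs => simp_all
          simp [canon, hall2]
      · rintro (h | h)
        · simp at h
        · simp only [List.any_cons, Bool.or_eq_true] at h
          rcases h with h | h
          · simp at h
          · exact hE h

-- ===== VERDICT (by name: the statement is the Claim_ definition above) =====
theorem common_suffix_spec : Claim_equal_common_suffix := by
  intro words _
  unfold Spec_common_suffix
  cases words with
  | nil =>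
    show common_suffix [] = common_suffix_alt []
    simp only [common_suffix, common_suffix_alt, List.map_nil,
      show pyZipCols [] = [] from by rw [pyZipCols.eq_def]; simp]
    simp [colLoop]
  | cons w0 rest =>
    show common_suffix (w0 :: rest) = common_suffix_alt (w0 :: rest)
    unfold common_suffix common_suffix_alt
    simp only [List.map_cons]
    rw [colLoop_canon, accLoop_canon]
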